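-- pv_equiv track=rewrite | github.com/mickey-40/capstone_project_Career_Match | backend/app/analyzer/keyword.py | _split_required_and_nice
-- ===== SOURCE A (Python) =====
-- from typing import Dict, List, Set, Tuple
--
-- def _split_required_and_nice(job_text: str) -> Tuple[str, str]:
--     """
--     Split common job description sections into required and nice-to-have text.
--     If no markers are found, treat entire text as required.
--     """
--     lower = job_text.lower()
--     markers = ["nice to have", "preferred", "bonus", "plus:"]
--     marker_positions = [lower.find(m) for m in markers if lower.find(m) != -1]
--     if not marker_positions:
--         return job_text, ""
--     idx = min(marker_positions)
--     return job_text[:idx], job_text[idx:]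
-- ===== SOURCE B (Python) =====
-- def _split_required_and_nice(job_text):
--     """Single left-to-right scan: split at the first position where any
--     section marker starts (case-insensitive); whole text is required if none."""
--     lower = job_text.lower()
--     markers = ("nice to have", "preferred", "bonus", "plus:")
--     for i in range(len(lower)):
--         if lower.startswith(markers, i):
--             return job_text[:i], job_text[i:]
--     return job_text, ""
-- ===== Notes on version B (the rewrite author's own statement) =====
-- stated objective: idiomatic
-- what changed: Replaces the four separate str.find scans plus the min reduction by one left-to-right scan that stops at the first position where any marker starts (str.startswith with a tuple).
import Mathlib
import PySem

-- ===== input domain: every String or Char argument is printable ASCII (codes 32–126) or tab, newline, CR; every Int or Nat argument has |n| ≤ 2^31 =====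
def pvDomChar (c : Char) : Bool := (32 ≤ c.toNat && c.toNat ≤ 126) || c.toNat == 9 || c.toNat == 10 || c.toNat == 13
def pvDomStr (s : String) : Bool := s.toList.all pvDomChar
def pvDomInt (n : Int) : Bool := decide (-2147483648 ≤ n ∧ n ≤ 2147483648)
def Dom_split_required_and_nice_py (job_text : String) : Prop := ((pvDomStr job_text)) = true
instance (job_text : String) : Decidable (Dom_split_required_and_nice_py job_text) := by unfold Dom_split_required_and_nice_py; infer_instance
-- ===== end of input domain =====

-- B replaces the four separate find scans plus the min reduction by one left-to-right
-- scan stopping at the first position where any marker starts (objective: idiomatic).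

-- ===== PORT A =====
def split_required_and_nice_py (job_text : String) : String × String :=
  let lower := PySem.Str.lower job_text
  let markers : List String := ["nice to have", "preferred", "bonus", "plus:"]
  let marker_positions :=
    (markers.filter (fun m => PySem.Str.find lower m ≠ -1)).map
      (fun m => PySem.Str.find lower m)
  match PySem.List.min? marker_positions (fun x => x) with
  | none => (job_text, "")
  | some idx =>
      (PySem.Str.slice job_text none (some idx), PySem.Str.slice job_text (some idx) none)

-- ===== PORT B =====
-- the 'for i in range(len(lower)): if lower.startswith(markers, i)' loop of Source B,
-- as structural recursion on the suffix starting at position i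
def pvScan (markers : List (List Char)) : List Char → Option Nat
  | [] => none
  | c :: rest =>
      if markers.any (fun m => PySem.Chars.startswith (c :: rest) m) then some 0
      else (pvScan markers rest).map (· + 1)

def split_required_and_nice_py_alt (job_text : String) : String × String :=
  let lower := PySem.Chars.lower job_text.toList
  let markers : List (List Char) :=
    ["nice to have".toList, "preferred".toList, "bonus".toList, "plus:".toList]
  match pvScan markers lower with
  | some i =>
      (PySem.Str.slice job_text none (some (i : Int)),
       PySem.Str.slice job_text (some (i : Int)) none)
  | none => (job_text, "")

-- ===== PRECONDITION & SPEC =====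
def Spec_split_required_and_nice_py (job_text : String) (out : String × String) : Prop := out = split_required_and_nice_py_alt job_text
instance (job_text : String) (out : String × String) : Decidable (Spec_split_required_and_nice_py job_text out) := by unfold Spec_split_required_and_nice_py; infer_instance

-- ===== CLAIM (what is proved, stated in full; the proofs are below) =====
def Claim_equal_split_required_and_nice_py : Prop := ∀ (job_text : String), Dom_split_required_and_nice_py job_text → Spec_split_required_and_nice_py job_text (split_required_and_nice_py job_text)

-- ===== LEMMAS AND PROOFS =====

-- pvScan returns a position where some marker is a prefix, and it is the first such
theorem pvScan_some (M : List (List Char)) (L : List Char) (i : Nat)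
    (h : pvScan M L = some i) :
    (∃ m ∈ M, m <+: L.drop i) ∧ ∀ j < i, ¬ ∃ m ∈ M, m <+: L.drop j := by
  induction L generalizing i with
  | nil => simp [pvScan] at h
  | cons c rest ih =>
    rw [pvScan] at h
    by_cases hc : M.any (fun m => PySem.Chars.startswith (c :: rest) m)
    · rw [if_pos hc] at h
      obtain rfl : (0 : Nat) = i := Option.some.inj h
      refine ⟨?_, by omega⟩
      simp only [List.any_eq_true, PySem.Chars.startswith_iff] at hc
      simpa using hc
    · rw [if_neg hc] at h
      cases hp : pvScan M rest with
      | none => rw [hp] at h; simp at h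
      | some k =>
        rw [hp] at h; simp at h
        subst h
        obtain ⟨h1, h2⟩ := ih k hp
        constructor
        · simpa using h1
        · intro j hj hex
          cases j with
          | zero =>
            obtain ⟨m, hm, hpre⟩ := hex
            have hany : (M.any fun m => PySem.Chars.startswith (c :: rest) m) = true := by
              simp only [List.any_eq_true, PySem.Chars.startswith_iff]
              exact ⟨m, hm, by simpa using hpre⟩
            exact hc hany
          | succ j' =>
            exact h2 j' (by omega) (by simpa using hex)

theorem pvScan_none (M : List (List Char)) (L : List Char)
    (hne : ∀ m ∈ M, m ≠ []) (h : pvScan M L = none) :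
    ∀ i, ¬ ∃ m ∈ M, m <+: L.drop i := by
  induction L with
  | nil =>
    intro i ⟨m, hm, hpre⟩
    exact hne m hm (List.prefix_nil.mp (by simpa using hpre))
  | cons c rest ih =>
    rw [pvScan] at h
    by_cases hc : M.any (fun m => PySem.Chars.startswith (c :: rest) m)
    · rw [if_pos hc] at h; cases h
    · rw [if_neg hc, Option.map_eq_none_iff] at h
      intro i hex
      cases i with
      | zero =>
        obtain ⟨m, hm, hpre⟩ := hex
        have hany : (M.any fun m => PySem.Chars.startswith (c :: rest) m) = true := by
          simp only [List.any_eq_true, PySem.Chars.startswith_iff]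
          exact ⟨m, hm, by simpa using hpre⟩
        exact hc hany
      | succ i' =>
        exact ih h i' (by simpa using hex)

-- the combined characterisation: Python's min-over-finds equals the scan's result
theorem min_finds_eq_pvScan (MS : List String) (L : List Char)
    (hne : ∀ m ∈ MS, m.toList ≠ []) :
    PySem.List.min?
      ((MS.filter (fun m => PySem.Chars.find L m.toList ≠ -1)).map
        (fun m => PySem.Chars.find L m.toList)) (fun x => x)
      = Option.map (fun i : Nat => (i : Int)) (pvScan (MS.map String.toList) L) := by
  cases hs : pvScan (MS.map String.toList) L with
  | none =>
    simp only [Option.map_none]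
    rw [PySem.List.min?_eq_none_iff, List.map_eq_nil_iff, List.filter_eq_nil_iff]
    intro m hm
    simp only [decide_not, Bool.not_eq_true', decide_eq_false_iff_not, not_not]
    rw [PySem.Chars.find_eq_neg_one_iff]
    intro hinf
    obtain ⟨t, hpre, hsuf⟩ := List.infix_iff_prefix_suffix.mp hinf
    obtain ⟨j, rfl⟩ : ∃ j, t = L.drop j := by
      obtain ⟨u, rfl⟩ := hsuf
      exact ⟨u.length, by simp⟩
    exact pvScan_none _ L (by simpa using hne) hs j ⟨m.toList, List.mem_map.mpr ⟨m, hm, rfl⟩, hpre⟩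
  | some i =>
    obtain ⟨⟨m0, hm0, hpre0⟩, hmin⟩ := pvScan_some _ L i hs
    obtain ⟨s0, hs0, rfl⟩ := List.mem_map.mp hm0
    have hocc0 : PySem.Chars.find L s0.toList ≠ -1 := by
      rw [PySem.Chars.find_ne_neg_one_iff]
      exact List.infix_iff_prefix_suffix.mpr ⟨L.drop i, hpre0, List.drop_suffix i L⟩
    have hmem0 : PySem.Chars.find L s0.toList ∈
        (MS.filter (fun m => PySem.Chars.find L m.toList ≠ -1)).map
          (fun m => PySem.Chars.find L m.toList) :=
      List.mem_map.mpr ⟨s0, List.mem_filter.mpr ⟨hs0, by simpa using hocc0⟩, rfl⟩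
    cases hv : PySem.List.min?
        ((MS.filter (fun m => PySem.Chars.find L m.toList ≠ -1)).map
          (fun m => PySem.Chars.find L m.toList)) (fun x => x) with
    | none =>
      rw [PySem.List.min?_eq_none_iff] at hv
      rw [hv] at hmem0; cases hmem0
    | some v =>
      -- v is the find of some occurring marker
      obtain ⟨mv, hmvf, hveq⟩ := List.mem_map.mp (PySem.List.min?_mem hv)
      obtain ⟨hmv, hoccv⟩ := List.mem_filter.mp hmvf
      have hveq' : PySem.Chars.find L mv.toList = v := hveq
      have hoccv' : PySem.Chars.find L mv.toList ≠ -1 := by simpa using hoccv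
      have hv0 : 0 ≤ v := by
        have := PySem.Chars.neg_one_le_find L mv.toList
        omega
      -- marker mv occurs as a prefix at position v.toNat
      have hvpre : mv.toList <+: L.drop v.toNat := by
        rw [← hveq'] at hv0 ⊢
        exact (PySem.Chars.find_spec hv0).1
      -- minimality of i (from pvScan) gives i ≤ v.toNat
      have hile : i ≤ v.toNat := by
        by_contra hlt
        exact hmin v.toNat (by omega) ⟨mv.toList, List.mem_map.mpr ⟨mv, hmv, rfl⟩, hvpre⟩
      -- minimality of find and of min? gives v ≤ i
      have hfle : PySem.Chars.find L s0.toList ≤ (i : Int) := by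
        have h0 : 0 ≤ PySem.Chars.find L s0.toList := by
          have := PySem.Chars.neg_one_le_find L s0.toList
          omega
        by_contra hgt
        exact (PySem.Chars.find_spec h0).2 i (by omega) hpre0
      have hvle : v ≤ (i : Int) :=
        le_trans (PySem.List.min?_isMin hv _ hmem0) hfle
      simp only [Option.map_some]
      congr 1
      omega

-- the markers of A, as strings (proof-side abbreviation)
def pvMarkers : List String := ["nice to have", "preferred", "bonus", "plus:"]

-- ===== VERDICT (by name: the statement is the Claim_ definition above) =====
theorem split_required_and_nice_py_spec : Claim_equal_split_required_and_nice_py := by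
  intro job_text _
  unfold Spec_split_required_and_nice_py
  unfold split_required_and_nice_py split_required_and_nice_py_alt
  have hL : (PySem.Str.lower job_text).toList = PySem.Chars.lower job_text.toList :=
    PySem.Str.toList_lower job_text
  have hkey := min_finds_eq_pvScan pvMarkers (PySem.Chars.lower job_text.toList)
    (by intro m hm; fin_cases hm <;> decide)
  simp only [PySem.Str.find_eq, hL] at *
  have hMS : (pvMarkers.map String.toList) =
      ["nice to have".toList, "preferred".toList, "bonus".toList, "plus:".toList] := by
    decide
  rw [hMS] at hkey
  rw [show (["nice to have", "preferred", "bonus", "plus:"] : List String) = pvMarkers from rfl]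
  rw [hkey]
  cases pvScan ["nice to have".toList, "preferred".toList, "bonus".toList, "plus:".toList]
      (PySem.Chars.lower job_text.toList) with
  | none => rfl
  | some i => rfl
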